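-- pv_equiv track=rewrite | github.com/ntornow/unity2rbxlx | converter/unity/yaml_parser.py | _split_yaml_documents
-- ===== SOURCE A (Python) =====
-- def _split_yaml_documents(text: str) -> list[str]:
--     """Split cleaned YAML text into individual document strings."""
--     parts: list[str] = []
--     current: list[str] = []
--     for line in text.split("\n"):
--         if line.strip() == "---":
--             parts.append("\n".join(current))
--             current = []
--         else:
--             current.append(line)
--     if current:
--         parts.append("\n".join(current))
--     return parts
-- ===== SOURCE B (Python) =====
-- def _find_sep(lines):
--     for i, line in enumerate(lines):
--         if line.strip() == "---":
--             return i
--     return None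
--
--
-- def _split_yaml_documents(text: str) -> list[str]:
--     """Split cleaned YAML text into individual document strings."""
--     lines = text.split("\n")
--     parts = []
--     i = _find_sep(lines)
--     while i is not None:
--         parts.append("\n".join(lines[:i]))
--         lines = lines[i + 1:]
--         i = _find_sep(lines)
--     if lines:
--         parts.append("\n".join(lines))
--     return parts
-- ===== Notes on version B (the rewrite author's own statement) =====
-- stated objective: alternative
-- what changed: Replaces the accumulate-and-flush loop (growing a current-line buffer and flushing it at each separator line) by a find-next-separator-and-slice loop: it locates the index of the next separator line, joins the prefix slice as one document, and continues on the suffix after it.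
import Mathlib
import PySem

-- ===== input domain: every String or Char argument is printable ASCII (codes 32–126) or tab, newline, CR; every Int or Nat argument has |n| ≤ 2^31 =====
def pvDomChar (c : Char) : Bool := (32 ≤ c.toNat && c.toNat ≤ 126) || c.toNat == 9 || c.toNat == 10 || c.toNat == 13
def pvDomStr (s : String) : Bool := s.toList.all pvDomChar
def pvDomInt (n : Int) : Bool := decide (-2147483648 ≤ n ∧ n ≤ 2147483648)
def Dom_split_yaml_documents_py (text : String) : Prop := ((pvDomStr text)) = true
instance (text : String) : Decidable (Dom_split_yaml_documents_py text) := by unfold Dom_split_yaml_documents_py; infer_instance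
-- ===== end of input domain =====

-- B replaces A's accumulate-and-flush loop by a find-next-separator-and-slice loop (alternative decomposition, same cost).

-- ===== PORT A =====
-- A: fold over the lines keeping (parts, current); flush current on each separator line, then flush a non-empty tail.
def split_yaml_documents_py (text : String) : List String :=
  let st : List String × List String := ((PySem.Str.split? text "\n").getD []).foldl
    (fun (st : List String × List String) line =>
      if PySem.Str.strip line == "---" then (st.1 ++ [PySem.Str.join "\n" st.2], [])
      else (st.1, st.2 ++ [line])) ([], [])
  if st.2.isEmpty then st.1 else st.1 ++ [PySem.Str.join "\n" st.2]

-- ===== PORT B =====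
-- port of _find_sep: index of the first line whose strip is "---", None if absent
def findSep : List String → Option Nat
  | [] => none
  | l :: ls => if PySem.Str.strip l == "---" then some 0 else (findSep ls).map (· + 1)

theorem findSep_some_ne_nil {ls : List String} {i : Nat} (h : findSep ls = some i) : ls ≠ [] := by
  cases ls <;> simp [findSep] at h ⊢

-- port of B's while loop: cut at the next separator, recurse on the suffix; non-empty remainder is the last document
def splitGo (lines : List String) : List String :=
  match h : findSep lines with
  | some i => PySem.Str.join "\n" (lines.take i) :: splitGo (lines.drop (i + 1))
  | none => if lines.isEmpty then [] else [PySem.Str.join "\n" lines]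
termination_by lines.length
decreasing_by
  have : lines ≠ [] := findSep_some_ne_nil h
  have : 0 < lines.length := List.length_pos_iff.mpr this
  simp [List.length_drop]; omega

def split_yaml_documents_py_alt (text : String) : List String :=
  splitGo ((PySem.Str.split? text "\n").getD [])

-- ===== PRECONDITION & SPEC =====
def Spec_split_yaml_documents_py (text : String) (out : List String) : Prop := out = split_yaml_documents_py_alt text
instance (text : String) (out : List String) : Decidable (Spec_split_yaml_documents_py text out) := by unfold Spec_split_yaml_documents_py; infer_instance

-- ===== CLAIM (what is proved, stated in full; the proofs are below) =====
def Claim_equal_split_yaml_documents_py : Prop := ∀ (text : String), Dom_split_yaml_documents_py text → Spec_split_yaml_documents_py text (split_yaml_documents_py text)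

-- ===== LEMMAS AND PROOFS =====

-- proof-side intermediate: A's loop with pending buffer acc over the remaining lines
def goMid : List String → List String → List String
  | acc, [] => if acc.isEmpty then [] else [PySem.Str.join "\n" acc]
  | acc, l :: ls =>
      if PySem.Str.strip l == "---" then PySem.Str.join "\n" acc :: goMid [] ls
      else goMid (acc ++ [l]) ls

theorem foldA_eq_goMid (lines : List String) : ∀ parts current : List String,
    (let st := lines.foldl
      (fun (st : List String × List String) line =>
        if PySem.Str.strip line == "---" then (st.1 ++ [PySem.Str.join "\n" st.2], [])
        else (st.1, st.2 ++ [line])) (parts, current)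
     if st.2.isEmpty then st.1 else st.1 ++ [PySem.Str.join "\n" st.2])
    = parts ++ goMid current lines := by
  induction lines with
  | nil =>
      intro parts current
      simp only [List.foldl_nil, goMid]
      split <;> simp_all
  | cons l ls ih =>
      intro parts current
      simp only [List.foldl_cons, goMid]
      by_cases h : (PySem.Str.strip l == "---") = true
      · rw [if_pos h, ih]
        rw [if_pos h, List.append_assoc, List.singleton_append]
      · rw [if_neg h, ih, if_neg h]

theorem findSep_none_of_all {acc : List String}
    (h : ∀ a ∈ acc, (PySem.Str.strip a == "---") = false) : findSep acc = none := by
  induction acc with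
  | nil => rfl
  | cons a as ih =>
      have ha := h a (List.mem_cons_self ..)
      simp [findSep, ha, ih fun x hx => h x (List.mem_cons_of_mem _ hx)]

theorem findSep_append_sep {acc : List String} {l : String} {ls : List String}
    (h : ∀ a ∈ acc, (PySem.Str.strip a == "---") = false)
    (hl : (PySem.Str.strip l == "---") = true) :
    findSep (acc ++ l :: ls) = some acc.length := by
  induction acc with
  | nil => simp [findSep, hl]
  | cons a as ih =>
      have ha := h a (List.mem_cons_self ..)
      simp [findSep, ha, ih fun x hx => h x (List.mem_cons_of_mem _ hx)]

theorem goMid_eq_splitGo (ls : List String) : ∀ acc : List String,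
    (∀ a ∈ acc, (PySem.Str.strip a == "---") = false) →
    goMid acc ls = splitGo (acc ++ ls) := by
  induction ls with
  | nil =>
      intro acc h
      rw [splitGo.eq_def]
      split
      · next i heq =>
          rw [List.append_nil, findSep_none_of_all h] at heq
          simp at heq
      · simp [goMid]
  | cons l ls ih =>
      intro acc h
      by_cases hl : (PySem.Str.strip l == "---") = true
      · rw [splitGo.eq_def]
        split
        case h_2 heq =>
          rw [findSep_append_sep h hl] at heq
          simp at heq
        case h_1 i heq =>
        rw [findSep_append_sep h hl] at heq
        obtain rfl : acc.length = i := Option.some.inj heq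
        have hre : acc ++ l :: ls = (acc ++ [l]) ++ ls := by simp
        have htake : (acc ++ l :: ls).take acc.length = acc := by
          simpa using List.take_left (l₁ := acc) (l₂ := l :: ls)
        have hdrop : (acc ++ l :: ls).drop (acc.length + 1) = ls := by
          rw [hre, show acc.length + 1 = (acc ++ [l]).length by simp]
          exact List.drop_left
        rw [htake, hdrop]
        simp only [goMid, hl, if_pos]
        rw [ih [] (by simp)]
        simp
      · have hstep : goMid acc (l :: ls) = goMid (acc ++ [l]) ls := by
          simp [goMid, hl]
        rw [hstep, ih (acc ++ [l]) ?_, List.append_assoc, List.singleton_append]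
        intro a ha
        rcases List.mem_append.mp ha with h1 | h1
        · exact h a h1
        · simp at h1; subst h1; simpa using hl

-- ===== VERDICT (by name: the statement is the Claim_ definition above) =====
theorem split_yaml_documents_py_spec : Claim_equal_split_yaml_documents_py := by
  intro text _
  unfold Spec_split_yaml_documents_py split_yaml_documents_py split_yaml_documents_py_alt
  have := foldA_eq_goMid ((PySem.Str.split? text "\n").getD []) [] []
  simp only at this
  rw [this, List.nil_append]
  simpa using goMid_eq_splitGo ((PySem.Str.split? text "\n").getD []) [] (by simp)
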